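-- pv_equiv track=rewrite | github.com/huyvohcmc/coursera-dsa | algorithms-on-strings/Algorithmic Challenges/suffix_array_long.py | sort_characters
-- ===== SOURCE A (Python) =====
-- def sort_characters(text):
--     order = [0] * len(text)
--     char_set = sorted(set(text))
--     count = [text.count(c) for c in char_set]
--
--     for i in range(1, len(count)):
--         count[i] += count[i - 1]
--
--     for i, c in reversed(list(enumerate(text))):
--         count[char_set.index(c)] -= 1
--         order[count[char_set.index(c)]] = i
--
--     return order
-- ===== SOURCE B (Python) =====
-- def sort_characters(text):
--     buckets = {}
--     for i, c in enumerate(text):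
--         buckets.setdefault(c, []).append(i)
--     order = []
--     for c in sorted(buckets):
--         order += buckets[c]
--     return order
-- ===== Notes on version B (the rewrite author's own statement) =====
-- stated objective: faster
-- what changed: Replaced the count-array counting sort (which rescans the text with text.count per distinct char and calls char_set.index twice per character) by a single enumerate pass that buckets positions per character in a dict, then concatenates the buckets over the sorted keys.
import Mathlib
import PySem

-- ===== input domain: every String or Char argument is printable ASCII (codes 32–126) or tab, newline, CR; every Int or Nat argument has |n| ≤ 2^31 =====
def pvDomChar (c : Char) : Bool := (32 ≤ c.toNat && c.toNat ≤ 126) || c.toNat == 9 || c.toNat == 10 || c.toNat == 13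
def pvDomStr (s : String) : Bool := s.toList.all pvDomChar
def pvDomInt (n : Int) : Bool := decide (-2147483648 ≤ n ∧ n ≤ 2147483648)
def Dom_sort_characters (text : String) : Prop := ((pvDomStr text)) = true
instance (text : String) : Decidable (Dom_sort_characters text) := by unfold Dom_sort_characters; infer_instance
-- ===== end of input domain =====

-- B replaces A's count-array counting sort (text.count per distinct char, char_set.index per
-- character) by one bucketing pass over enumerate(text) and a concatenation over the sorted keys.

-- ===== PORT A =====
-- literal transliteration of A; 'count[char_set.index(c)]' : index() never raises here since
-- c ∈ char_set, so the '.getD 0' branch of index? is never taken; order[...] = i is pySetD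
-- (total form of xs[i]=v), exact because the write position is always in range.
def sort_characters (text : String) : List Int :=
  let cs := text.toList
  let order : List Int := List.replicate cs.length 0
  let char_set := PySem.List.sorted (PySem.Set.ofList cs) (fun c => c) false
  let count : List Int := char_set.map (fun c => (PySem.List.count cs c : Int))
  let count := (PySem.List.pyRange 1 (count.length : Int) 1).foldl
      (fun cnt i => PySem.List.pySetD cnt i
        (PySem.List.pyGetD cnt i 0 + PySem.List.pyGetD cnt (i - 1) 0)) count
  let st := ((PySem.List.enumerate cs 0).reverse).foldl
      (fun st p =>
        let k : Int := (((PySem.List.index? char_set p.2).getD 0 : Nat) : Int)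
        let cnt := PySem.List.pySetD st.1 k (PySem.List.pyGetD st.1 k 0 - 1)
        let ord := PySem.List.pySetD st.2 (PySem.List.pyGetD cnt k 0) p.1
        (cnt, ord))
      (count, order)
  st.2

-- ===== PORT B =====
def sort_characters_alt (text : String) : List Int :=
  let buckets : PySem.Dict Char (List Int) := (PySem.List.enumerate text.toList 0).foldl
      (fun d p => d.modify p.2 ([] : List Int) (fun l => l ++ [p.1])) PySem.Dict.empty
  let ks := PySem.List.sorted buckets.keys (fun c => c) false
  ks.foldl (fun acc c => acc ++ buckets.getD c []) []

-- ===== PRECONDITION & SPEC =====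
def Spec_sort_characters (text : String) (out : List Int) : Prop := out = sort_characters_alt text
instance (text : String) (out : List Int) : Decidable (Spec_sort_characters text out) := by unfold Spec_sort_characters; infer_instance

-- ===== CLAIM (what is proved, stated in full; the proofs are below) =====
def Claim_equal_sort_characters : Prop := ∀ (text : String), Dom_sort_characters text → Spec_sort_characters text (sort_characters text)

-- ===== LEMMAS AND PROOFS =====

-- proof-side vocabulary ---------------------------------------------------
def csetOf (cs : List Char) : List Char := PySem.List.sorted (PySem.Set.ofList cs) (fun c => c) false
def cntLt (cs : List Char) (c : Char) : Nat := cs.countP (fun d => decide (d < c))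
def cntLe (cs : List Char) (c : Char) : Nat := cs.countP (fun d => decide (d ≤ c))
/-- write position of the occurrence of `c` at text index `k`. -/
def wpPair (cs : List Char) (k : Nat) (c : Char) : Nat := cntLt cs c + (cs.take k).count c
def wpN (cs : List Char) (k : Nat) : Nat := wpPair cs k (cs.getD k default)
/-- recursive occurrence-position list of `c` in `cs`. -/
def occR (cs : List Char) (c : Char) : List Nat :=
  match cs with
  | [] => []
  | d :: r => if d = c then 0 :: (occR r c).map (· + 1) else (occR r c).map (· + 1)
/-- B's bucket for char `c`: indices (as Ints) of occurrences of `c`. -/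
def occI (cs : List Char) (c : Char) : List Int :=
  ((PySem.List.enumerate cs 0).filter (fun p => p.2 == c)).map (·.1)
/-- apply a list of (position, value) writes, last list element written first. -/
def scat (ws : List (Nat × Int)) (o : List Int) : List Int :=
  ws.foldr (fun w o => o.set w.1 w.2) o
def wlist (cs : List Char) (t : Nat) : List (Nat × Int) :=
  (List.range' t (cs.length - t)).map (fun k => (wpN cs k, (k : Int)))
def countAt (cs : List Char) (t : Nat) : List Int :=
  (csetOf cs).map (fun c => (cntLe cs c : Int) - ((cs.drop t).count c : Int))
/-- the body of A's main loop. -/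
def stepA (char_set : List Char) (st : List Int × List Int) (p : Int × Char) : List Int × List Int :=
  let k : Int := (((PySem.List.index? char_set p.2).getD 0 : Nat) : Int)
  let cnt := PySem.List.pySetD st.1 k (PySem.List.pyGetD st.1 k 0 - 1)
  let ord := PySem.List.pySetD st.2 (PySem.List.pyGetD cnt k 0) p.1
  (cnt, ord)

-- generic counting lemmas -------------------------------------------------
theorem countP_disjoint {α : Type} (l : List α) (p q : α → Bool)
    (h : ∀ x ∈ l, ¬(p x = true ∧ q x = true)) :
    l.countP (fun x => p x || q x) = l.countP p + l.countP q := by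
  induction l with
  | nil => simp
  | cons a l ih =>
    have ha := h a (by simp)
    have ih' := ih (fun x hx => h x (by simp [hx]))
    simp only [List.countP_cons, ih']
    cases hp : p a <;> cases hq : q a <;> simp_all <;> omega

theorem cntLe_eq (cs : List Char) (c : Char) : cntLe cs c = cntLt cs c + cs.count c := by
  unfold cntLe cntLt
  rw [List.count_eq_countP,
    ← countP_disjoint cs (fun d => decide (d < c)) (fun d => d == c)
      (by intro x _ ⟨h1, h2⟩
          simp only [decide_eq_true_eq, beq_iff_eq] at h1 h2
          exact absurd h1 (by simp [h2]))]
  apply List.countP_congr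
  intro d _
  rcases lt_trichotomy d c with h | h | h
  · simp [le_of_lt h, h]
  · subst h; simp
  · simp [not_le.mpr h, not_lt.mpr (le_of_lt h), LT.lt.ne' h]

theorem cntLe_le_cntLt (cs : List Char) (c c' : Char) (h : c < c') :
    cntLe cs c ≤ cntLt cs c' := by
  unfold cntLe cntLt
  apply List.countP_mono_left
  intro d _ hd
  simp only [decide_eq_true_eq] at hd ⊢
  exact lt_of_le_of_lt hd h

theorem sum_count_nodup (cs : List Char) (M : List Char) (hM : M.Nodup) :
    ((M.map (fun d => cs.count d)).sum) = cs.countP (fun d => decide (d ∈ M)) := by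
  induction M with
  | nil => simp
  | cons a M ih =>
    have hnd := (List.nodup_cons.mp hM)
    rw [List.map_cons, List.sum_cons, ih hnd.2, List.count_eq_countP,
      ← countP_disjoint cs (fun d => d == a) (fun d => decide (d ∈ M))
        (by intro x _ ⟨h1, h2⟩
            simp only [beq_iff_eq, decide_eq_true_eq] at h1 h2
            exact hnd.1 (h1 ▸ h2))]
    apply List.countP_congr
    intro d _
    by_cases h : d = a <;> simp [h]

theorem count_take_add_drop (cs : List Char) (c : Char) (t : Nat) :
    (cs.take t).count c + (cs.drop t).count c = cs.count c := by
  conv_rhs => rw [← List.take_append_drop t cs]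
  rw [List.count_append]

theorem count_take_lt (cs : List Char) (k : Nat) (hk : k < cs.length) :
    (cs.take k).count cs[k] < cs.count cs[k] := by
  have h1 : (cs.take (k+1)).count cs[k] = (cs.take k).count cs[k] + 1 := by
    rw [List.take_succ_eq_append_getElem hk, List.count_append]
    simp
  have h2 : (cs.take (k+1)).count cs[k] ≤ cs.count cs[k] :=
    List.Sublist.count_le _ (List.take_sublist _ _)
  omega

theorem count_take_mono (cs : List Char) (c : Char) {k1 k2 : Nat} (h : k1 ≤ k2) :
    (cs.take k1).count c ≤ (cs.take k2).count c :=
  List.Sublist.count_le _ (List.take_sublist_take_left h)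

-- csetOf facts -------------------------------------------------------------
theorem mem_csetOf (cs : List Char) (c : Char) : c ∈ csetOf cs ↔ c ∈ cs := by
  unfold csetOf
  rw [PySem.List.mem_sorted]
  exact PySem.Set.mem_ofList cs c
theorem csetOf_pairwise (cs : List Char) : (csetOf cs).Pairwise (· < ·) :=
  PySem.List.sorted_ofList_pairwise_lt cs
theorem csetOf_nodup (cs : List Char) : (csetOf cs).Nodup :=
  (csetOf_pairwise cs).imp (fun h => ne_of_lt h)

-- wp facts -----------------------------------------------------------------
theorem wpPair_lt (cs : List Char) (k : Nat) (c : Char)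
    (h : (cs.take k).count c < cs.count c) : wpPair cs k c < cntLe cs c := by
  unfold wpPair
  rw [cntLe_eq]
  omega

theorem cntLe_le_length (cs : List Char) (c : Char) : cntLe cs c ≤ cs.length :=
  List.countP_le_length

theorem wpN_lt (cs : List Char) (k : Nat) (hk : k < cs.length) : wpN cs k < cs.length := by
  unfold wpN
  rw [List.getD_eq_getElem cs default hk]
  exact lt_of_lt_of_le (wpPair_lt cs k cs[k] (count_take_lt cs k hk)) (cntLe_le_length cs cs[k])

theorem wpN_inj (cs : List Char) (k1 k2 : Nat) (h1 : k1 < cs.length) (h2 : k2 < cs.length)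
    (hne : k1 ≠ k2) : wpN cs k1 ≠ wpN cs k2 := by
  have key : ∀ a b, a < b → b < cs.length → wpN cs a ≠ wpN cs b := by
    intro a b hab hb
    have ha : a < cs.length := lt_trans hab hb
    unfold wpN wpPair
    rw [List.getD_eq_getElem cs default ha, List.getD_eq_getElem cs default hb]
    by_cases hc : cs[a] = cs[b]
    · rw [hc]
      have h1 : (cs.take (a+1)).count cs[b] = (cs.take a).count cs[b] + 1 := by
        rw [List.take_succ_eq_append_getElem ha, List.count_append, hc]
        simp
      have h2 : (cs.take (a+1)).count cs[b] ≤ (cs.take b).count cs[b] :=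
        count_take_mono cs cs[b] hab
      omega
    · rcases lt_or_gt_of_ne hc with h | h
      · have h1 : wpPair cs a cs[a] < cntLe cs cs[a] :=
          wpPair_lt cs a cs[a] (count_take_lt cs a ha)
        have h2 : cntLe cs cs[a] ≤ cntLt cs cs[b] := cntLe_le_cntLt cs cs[a] cs[b] h
        unfold wpPair at h1
        omega
      · have h1 : wpPair cs b cs[b] < cntLe cs cs[b] :=
          wpPair_lt cs b cs[b] (count_take_lt cs b hb)
        have h2 : cntLe cs cs[b] ≤ cntLt cs cs[a] := cntLe_le_cntLt cs cs[b] cs[a] h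
        unfold wpPair at h1
        omega
  rcases Nat.lt_or_ge k1 k2 with h | h
  · exact key k1 k2 h h2
  · exact (key k2 k1 (lt_of_le_of_ne h (fun e => hne e.symm)) h1).symm

theorem wpN_surj (cs : List Char) (j : Nat) (hj : j < cs.length) :
    ∃ k, k < cs.length ∧ wpN cs k = j := by
  set P := (List.range cs.length).map (wpN cs) with hP
  have hnd : P.Nodup := by
    apply List.Nodup.map_on _ (List.nodup_range)
    intro x hx y hy hxy
    by_contra hne
    exact wpN_inj cs x y (List.mem_range.mp hx) (List.mem_range.mp hy) hne hxy
  have hsub : P.toFinset ⊆ Finset.range cs.length := by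
    intro x hx
    rw [List.mem_toFinset, hP, List.mem_map] at hx
    obtain ⟨k, hk, rfl⟩ := hx
    exact Finset.mem_range.mpr (wpN_lt cs k (List.mem_range.mp hk))
  have hcard : (Finset.range cs.length).card ≤ P.toFinset.card := by
    rw [List.toFinset_card_of_nodup hnd, hP, List.length_map, List.length_range,
      Finset.card_range]
  have heq := Finset.eq_of_subset_of_card_le hsub hcard
  have hj : j ∈ P.toFinset := by rw [heq]; exact Finset.mem_range.mpr hj
  rw [List.mem_toFinset, hP, List.mem_map] at hj
  obtain ⟨k, hk, hw⟩ := hj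
  exact ⟨k, List.mem_range.mp hk, hw⟩

-- occurrence-list facts ----------------------------------------------------
theorem occI_gen (cs : List Char) (c : Char) (s : Int) :
    ((PySem.List.enumerate cs s).filter (fun p => p.2 == c)).map (·.1)
      = (occR cs c).map (fun t : Nat => s + (t : Int)) := by
  induction cs generalizing s with
  | nil => simp [occR]
  | cons d r ih =>
    rw [PySem.List.enumerate_cons]
    by_cases hd : d = c
    · subst hd
      simp only [occR, List.filter_cons, beq_self_eq_true, if_true,
        List.map_cons, List.map_map]
      refine congrArg₂ _ (by simp) ?_
      rw [ih (s + 1)]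
      apply List.map_congr_left
      intro t _
      simp only [Function.comp_apply]
      push_cast
      ring
    · simp only [occR, if_neg hd, List.filter_cons]
      rw [if_neg (by simp [hd])]
      rw [ih (s + 1)]
      simp only [List.map_map]
      apply List.map_congr_left
      intro t _
      simp only [Function.comp_apply]
      push_cast
      ring

theorem occI_eq (cs : List Char) (c : Char) :
    occI cs c = (occR cs c).map (fun t : Nat => (t : Int)) := by
  unfold occI
  rw [occI_gen cs c 0]
  apply List.map_congr_left
  intro t _
  simp

theorem length_occR (cs : List Char) (c : Char) : (occR cs c).length = cs.count c := by
  induction cs with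
  | nil => simp [occR]
  | cons d r ih =>
    by_cases hd : d = c
    · subst hd; simp [occR, ih]
    · simp [occR, hd, ih]

theorem occR_getElem? (cs : List Char) (c : Char) (k : Nat) (hk : k < cs.length)
    (hc : cs[k] = c) : (occR cs c)[(cs.take k).count c]? = some k := by
  induction cs generalizing k with
  | nil => simp at hk
  | cons d r ih =>
    cases k with
    | zero =>
      have hd : d = c := by simpa using hc
      subst hd
      simp [occR]
    | succ k =>
      have hk' : k < r.length := by simpa using hk
      have hc' : r[k] = c := by simpa using hc
      have ihk := ih k hk' hc'
      by_cases hd : d = c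
      · have hcount : ((d :: r).take (k + 1)).count c = (r.take k).count c + 1 := by
          simp [hd]
        rw [hcount]
        subst hd
        simp [occR, ihk]
      · have hcount : ((d :: r).take (k + 1)).count c = (r.take k).count c := by
          simp [hd]
        rw [hcount]
        simp [occR, hd, ihk]

theorem length_occI (cs : List Char) (c : Char) : (occI cs c).length = cs.count c := by
  rw [occI_eq, List.length_map, length_occR]

-- B pointwise --------------------------------------------------------------
theorem flat_getElem? (cs : List Char) (L : List Char) (hL : L.Pairwise (· < ·))
    (c : Char) (hc : c ∈ L) (r : Nat) (hr : r < (occI cs c).length) :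
    (L.flatMap (occI cs))[((L.filter (fun d => decide (d < c))).map (fun d => (occI cs d).length)).sum + r]?
      = (occI cs c)[r]? := by
  induction L with
  | nil => simp at hc
  | cons c0 L ih =>
    rcases List.mem_cons.mp hc with rfl | hcL
    · have hfilt : (c :: L).filter (fun d => decide (d < c)) = [] := by
        rw [List.filter_eq_nil_iff]
        intro d hd
        rcases List.mem_cons.mp hd with rfl | hdL
        · simp
        · have h := (List.pairwise_cons.mp hL).1 d hdL
          simp [not_lt.mpr (le_of_lt h)]
      rw [hfilt]
      simp only [List.map_nil, List.sum_nil, Nat.zero_add, List.flatMap_cons]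
      rw [List.getElem?_append_left hr]
    · have hc0 : c0 < c := (List.pairwise_cons.mp hL).1 c hcL
      have hfilt : (c0 :: L).filter (fun d => decide (d < c))
          = c0 :: L.filter (fun d => decide (d < c)) := by simp [hc0]
      rw [hfilt]
      simp only [List.map_cons, List.sum_cons, List.flatMap_cons]
      have harith : (occI cs c0).length
            + ((L.filter (fun d => decide (d < c))).map (fun d => (occI cs d).length)).sum + r
          = (occI cs c0).length
            + (((L.filter (fun d => decide (d < c))).map (fun d => (occI cs d).length)).sum + r) := by
        omega
      rw [harith, List.getElem?_append_right (by omega), Nat.add_sub_cancel_left]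
      exact ih (List.pairwise_cons.mp hL).2 hcL

theorem sum_filter_lt (cs : List Char) (c : Char) (_hc : c ∈ cs) :
    (((csetOf cs).filter (fun d => decide (d < c))).map (fun d => (occI cs d).length)).sum
      = cntLt cs c := by
  rw [List.map_congr_left (fun d _ => length_occI cs d),
    sum_count_nodup cs _ ((csetOf_nodup cs).filter _)]
  unfold cntLt
  apply List.countP_congr
  intro d hd
  by_cases h : d < c <;> simp [List.mem_filter, mem_csetOf, hd, h]

theorem length_B (cs : List Char) : ((csetOf cs).flatMap (occI cs)).length = cs.length := by
  rw [List.length_flatMap,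
    List.map_congr_left (fun d _ => length_occI cs d),
    sum_count_nodup cs _ (csetOf_nodup cs)]
  have h : cs.countP (fun d => decide (d ∈ csetOf cs)) = cs.countP (fun _ => true) := by
    apply List.countP_congr
    intro d hd
    simp [mem_csetOf, hd]
  rw [h, List.countP_true]

theorem B_pointwise (cs : List Char) (k : Nat) (hk : k < cs.length) :
    ((csetOf cs).flatMap (occI cs))[wpN cs k]? = some (k : Int) := by
  have hmem : cs[k] ∈ cs := List.getElem_mem hk
  have hr : (cs.take k).count cs[k] < (occI cs cs[k]).length := by
    rw [length_occI]
    exact count_take_lt cs k hk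
  have hflat := flat_getElem? cs (csetOf cs) (csetOf_pairwise cs) cs[k]
    ((mem_csetOf cs cs[k]).mpr hmem) ((cs.take k).count cs[k]) hr
  rw [sum_filter_lt cs cs[k] hmem] at hflat
  have hwp : wpN cs k = cntLt cs cs[k] + (cs.take k).count cs[k] := by
    unfold wpN wpPair
    rw [List.getD_eq_getElem cs default hk]
  rw [hwp, hflat, occI_eq, List.getElem?_map, occR_getElem? cs cs[k] k hk rfl,
    Option.map_some]

theorem alt_eq_flatMap (text : String) :
    sort_characters_alt text = (csetOf text.toList).flatMap (occI text.toList) := by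
  unfold sort_characters_alt
  have hkeys : ((PySem.List.enumerate text.toList 0).foldl
        (fun d p => d.modify p.2 ([] : List Int) (fun l => l ++ [p.1]))
        PySem.Dict.empty).keys = PySem.Set.ofList text.toList := by
    rw [PySem.Dict.keys_foldl_modify_key, PySem.List.map_snd_enumerate]
    exact PySem.Set.update_nil_left text.toList
  have hgetD : ∀ c, ((PySem.List.enumerate text.toList 0).foldl
        (fun d p => d.modify p.2 ([] : List Int) (fun l => l ++ [p.1]))
        PySem.Dict.empty).getD c [] = occI text.toList c := by
    intro c
    have hswap : (PySem.List.enumerate text.toList 0).foldl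
          (fun d p => d.modify p.2 ([] : List Int) (fun l => l ++ [p.1])) PySem.Dict.empty
        = ((PySem.List.enumerate text.toList 0).map Prod.swap).foldl
          (fun d q => d.modify q.1 ([] : List Int) (fun l => l ++ [q.2])) PySem.Dict.empty := by
      rw [List.foldl_map]
      rfl
    rw [hswap, PySem.Dict.getD_foldl_modify_append, PySem.Dict.getD_empty, List.filter_map]
    unfold occI
    simp [List.map_map, Function.comp_def]
  show (PySem.List.sorted ((PySem.List.enumerate text.toList 0).foldl
        (fun d p => d.modify p.2 ([] : List Int) (fun l => l ++ [p.1]))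
        PySem.Dict.empty).keys (fun c => c) false).foldl
      (fun acc c => acc ++ ((PySem.List.enumerate text.toList 0).foldl
        (fun d p => d.modify p.2 ([] : List Int) (fun l => l ++ [p.1]))
        PySem.Dict.empty).getD c []) []
    = (csetOf text.toList).flatMap (occI text.toList)
  rw [hkeys, PySem.List.foldl_append_eq_flatMap, List.nil_append]
  simp only [hgetD]
  rfl

-- A side -------------------------------------------------------------------
theorem find?_eq_some_of_unique {α : Type} (l : List α) (p : α → Bool) (x : α)
    (hx : x ∈ l) (hpx : p x = true) (huniq : ∀ y ∈ l, p y = true → y = x) :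
    l.find? p = some x := by
  induction l with
  | nil => simp at hx
  | cons a l ih =>
    rcases List.mem_cons.mp hx with rfl | hxl
    · rw [List.find?_cons_of_pos hpx]
    · by_cases hpa : p a = true
      · have ha : a = x := huniq a (by simp) hpa
        subst ha
        rw [List.find?_cons_of_pos hpa]
      · rw [List.find?_cons_of_neg hpa]
        exact ih hxl (fun y hy hpy => huniq y (by simp [hy]) hpy)

theorem length_scat (ws : List (Nat × Int)) (o : List Int) : (scat ws o).length = o.length := by
  induction ws with
  | nil => rfl
  | cons w ws ih => simp [scat, List.length_set] at ih ⊢; exact ih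

theorem scat_getElem? (ws : List (Nat × Int)) (o : List Int) (j : Nat)
    (hw : ∀ w ∈ ws, w.1 < o.length) :
    (scat ws o)[j]? = (match ws.find? (fun w => w.1 == j) with
      | some w => if j < o.length then some w.2 else none
      | none => o[j]?) := by
  induction ws with
  | nil => simp [scat]
  | cons w ws ih =>
    have hw' : ∀ v ∈ ws, v.1 < o.length := fun v hv => hw v (by simp [hv])
    have hwlt : w.1 < o.length := hw w (by simp)
    show ((scat ws o).set w.1 w.2)[j]? = _
    by_cases hj : w.1 = j
    · subst hj
      rw [List.getElem?_set_self (by rw [length_scat]; exact hwlt)]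
      rw [List.find?_cons_of_pos (by simp)]
      simp [hwlt]
    · rw [List.getElem?_set_ne hj, ih hw', List.find?_cons_of_neg (by simp [hj])]

theorem prefix_aux (l : List Int) (j : Nat) (hj : j ≤ l.length) :
    (PySem.List.pyRange 1 (j : Int) 1).foldl
      (fun cnt i => PySem.List.pySetD cnt i
        (PySem.List.pyGetD cnt i 0 + PySem.List.pyGetD cnt (i - 1) 0)) l
    = (List.range j).map (fun k => (l.take (k + 1)).sum) ++ l.drop j := by
  induction j with
  | zero =>
    rw [show ((0 : Nat) : Int) = 0 from by norm_num,
      show PySem.List.pyRange 1 (0 : Int) 1 = [] from by decide]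
    simp
  | succ j ih =>
    rcases Nat.eq_zero_or_pos j with h0 | hpos
    · subst h0
      rw [show ((0 + 1 : Nat) : Int) = 1 from by norm_num,
        show PySem.List.pyRange 1 (1 : Int) 1 = [] from by decide]
      obtain ⟨a, t, rfl⟩ : ∃ a t, l = a :: t := by
        cases l with
        | nil => simp at hj
        | cons a t => exact ⟨a, t, rfl⟩
      simp
    · have hjl : j < l.length := by omega
      have hr : PySem.List.pyRange 1 ((j + 1 : Nat) : Int) 1
          = PySem.List.pyRange 1 (j : Int) 1 ++ [(j : Int)] := by
        push_cast
        exact PySem.List.pyRange_one_succ_right (by exact_mod_cast hpos)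
      rw [hr, List.foldl_append, ih (by omega)]
      set A := (List.range j).map (fun k => (l.take (k + 1)).sum) with hA
      have hAlen : A.length = j := by simp [hA]
      have hdrop : l.drop j = l[j] :: l.drop (j + 1) := List.drop_eq_getElem_cons hjl
      have hlen : (A ++ l.drop j).length = l.length := by
        simp [hAlen, List.length_drop]
        omega
      have g1 : PySem.List.pyGetD (A ++ l.drop j) (j : Int) 0 = l[j] := by
        rw [PySem.List.pyGetD_natCast, List.getD_eq_getElem?_getD,
          List.getElem?_append_right (by omega), hAlen]
        simp [List.getElem?_eq_getElem hjl]
      have g2 : PySem.List.pyGetD (A ++ l.drop j) ((j : Int) - 1) 0 = (l.take j).sum := by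
        rw [show ((j : Int) - 1) = ((j - 1 : Nat) : Int) by omega, PySem.List.pyGetD_natCast,
          List.getD_eq_getElem?_getD, List.getElem?_append_left (by omega), hA,
          List.getElem?_map, List.getElem?_range (by omega)]
        simp only [Option.map_some, Option.getD_some]
        rw [Nat.sub_add_cancel hpos]
      simp only [List.foldl_cons, List.foldl_nil, g1, g2]
      rw [PySem.List.pySetD_natCast, List.set_append,
        if_neg (by omega : ¬ j < A.length), hAlen, Nat.sub_self, hdrop]
      simp only [List.set_cons_zero]
      rw [List.range_succ, List.map_append]
      simp only [List.map_cons, List.map_nil, List.append_assoc, List.cons_append,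
        List.nil_append]
      rw [List.take_succ_eq_append_getElem hjl, List.sum_append]
      simp [add_comm]
      exact hA

theorem prefix_loop (l : List Int) :
    (PySem.List.pyRange 1 (l.length : Int) 1).foldl
      (fun cnt i => PySem.List.pySetD cnt i
        (PySem.List.pyGetD cnt i 0 + PySem.List.pyGetD cnt (i - 1) 0)) l
    = (List.range l.length).map (fun k => (l.take (k + 1)).sum) := by
  rw [prefix_aux l l.length (le_refl _), List.drop_length, List.append_nil]

theorem count1_eq (cs : List Char) :
    (List.range (csetOf cs).length).map
        (fun k => (((csetOf cs).map (fun c => (PySem.List.count cs c : Int))).take (k + 1)).sum)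
      = countAt cs cs.length := by
  have hnd := csetOf_nodup cs
  have hpw := (List.pairwise_iff_getElem).mp (csetOf_pairwise cs)
  apply List.ext_getElem
  · simp [countAt]
  intro k h1 h2
  have hk : k < (csetOf cs).length := by simpa using h1
  simp only [List.getElem_map, List.getElem_range]
  rw [← List.map_take]
  have hpc : ((csetOf cs).take (k + 1)).map (fun c => (PySem.List.count cs c : Int))
      = (((csetOf cs).take (k + 1)).map (fun c => List.count c cs)).map
          (fun n : Nat => (n : Int)) := by
    rw [List.map_map]
    apply List.map_congr_left
    intro c _
    simp [PySem.List.count_eq]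
  rw [hpc, ← Nat.cast_list_sum,
    sum_count_nodup cs _ (hnd.sublist (List.take_sublist _ _))]
  have hmemeq : cs.countP (fun d => decide (d ∈ (csetOf cs).take (k + 1)))
      = cntLe cs (csetOf cs)[k] := by
    apply List.countP_congr
    intro d hd
    by_cases hle : d ≤ (csetOf cs)[k]
    · have hdc : d ∈ csetOf cs := (mem_csetOf cs d).mpr hd
      obtain ⟨t, ht, rfl⟩ := List.mem_iff_getElem.mp hdc
      have htk : t ≤ k := by
        by_contra hgt
        exact absurd hle (not_le.mpr (hpw k t hk ht (by omega)))
      have hmem : (csetOf cs)[t] ∈ (csetOf cs).take (k + 1) := by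
        have h3 : t < ((csetOf cs).take (k + 1)).length := by
          simp only [List.length_take]
          omega
        have h4 := List.getElem_mem h3
        rwa [List.getElem_take] at h4
      simp [hmem, hle]
    · have hnm : d ∉ (csetOf cs).take (k + 1) := by
        intro hmem
        obtain ⟨t, ht, heq⟩ := List.mem_iff_getElem.mp hmem
        rw [List.getElem_take] at heq
        have ht' : t ≤ k ∧ t < (csetOf cs).length := by
          simp only [List.length_take] at ht
          omega
        rcases Nat.lt_or_ge t k with hlt | hge
        · exact hle (heq ▸ le_of_lt (hpw t k ht'.2 hk hlt))
        · have htk : t = k := by omega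
          subst htk
          exact hle (heq ▸ le_refl _)
      simp [hnm, hle]
  rw [hmemeq]
  simp [countAt, cntLe]

theorem index?_csetOf (cs : List Char) (c : Char) (hc : c ∈ cs) :
    ∃ k0, PySem.List.index? (csetOf cs) c = some k0 ∧ k0 < (csetOf cs).length ∧
      (csetOf cs)[k0]? = some c := by
  have hmem : c ∈ csetOf cs := (mem_csetOf cs c).mpr hc
  cases hi : PySem.List.index? (csetOf cs) c with
  | none => exact absurd hmem ((PySem.List.index?_eq_none_iff _ _).mp hi)
  | some k0 =>
    obtain ⟨hk0, hck0, -⟩ := PySem.List.getElem_of_index?_eq_some hi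
    exact ⟨k0, rfl, hk0, by rw [List.getElem?_eq_getElem hk0, hck0]⟩

theorem loop_inv (cs : List Char) (m t : Nat) (ht : t + m = cs.length) (ord : List Int) :
    (PySem.List.enumerate (cs.drop t) (t : Int)).foldr
        (fun p st => stepA (csetOf cs) st p) (countAt cs cs.length, ord)
      = (countAt cs t, scat (wlist cs t) ord) := by
  induction m generalizing t ord with
  | zero =>
    have ht' : t = cs.length := by omega
    subst ht'
    rw [List.drop_length, PySem.List.enumerate_nil]
    unfold wlist
    rw [Nat.sub_self, List.range'_zero, List.map_nil]
    rfl
  | succ m ih =>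
    have htn : t < cs.length := by omega
    have hdrop : cs.drop t = cs[t] :: cs.drop (t + 1) := List.drop_eq_getElem_cons htn
    set c := cs[t] with hc
    rw [hdrop, PySem.List.enumerate_cons,
      show ((t : Int) + 1) = ((t + 1 : Nat) : Int) by push_cast; ring,
      List.foldr_cons, ih (t + 1) (by omega) ord]
    -- facts about the char c and its index in csetOf
    have hmem : c ∈ cs := hc ▸ List.getElem_mem htn
    obtain ⟨k0, hidx, hk0, hck0⟩ := index?_csetOf cs c hmem
    have hck0' : (csetOf cs)[k0] = c := by
      rw [List.getElem?_eq_getElem hk0] at hck0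
      exact Option.some.inj hck0
    have hcount_drop : (cs.drop t).count c = (cs.drop (t + 1)).count c + 1 := by
      rw [hdrop]
      simp
    -- the count component
    have gC : PySem.List.pyGetD (countAt cs (t + 1)) ((k0 : Nat) : Int) 0
        = (cntLe cs c : Int) - ((cs.drop (t + 1)).count c : Int) := by
      rw [PySem.List.pyGetD_natCast, List.getD_eq_getElem?_getD]
      unfold countAt
      rw [List.getElem?_map, List.getElem?_eq_getElem hk0, hck0']
      rfl
    have hcnt : PySem.List.pySetD (countAt cs (t + 1)) ((k0 : Nat) : Int)
          ((cntLe cs c : Int) - ((cs.drop (t + 1)).count c : Int) - 1)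
        = countAt cs t := by
      rw [PySem.List.pySetD_natCast]
      apply List.ext_getElem
      · simp [countAt]
      intro i hi1 hi2
      have hi : i < (csetOf cs).length := by simpa [countAt] using hi2
      rw [List.getElem_set]
      by_cases hik : i = k0
      · subst hik
        rw [if_pos rfl]
        unfold countAt
        rw [List.getElem_map, hck0', hcount_drop]
        push_cast
        ring
      · rw [if_neg (fun h => hik h.symm)]
        unfold countAt
        rw [List.getElem_map, List.getElem_map]
        have hne : (csetOf cs)[i] ≠ c := by
          intro he
          exact hik ((List.Nodup.getElem_inj_iff (csetOf_nodup cs)).mp (he.trans hck0'.symm))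
        have hcc : (cs.drop t).count (csetOf cs)[i] = (cs.drop (t + 1)).count (csetOf cs)[i] := by
          rw [hdrop, List.count_cons]
          simp [Ne.symm hne]
        rw [hcc]
    -- the write position
    have gW : PySem.List.pyGetD (countAt cs t) ((k0 : Nat) : Int) 0 = ((wpN cs t : Nat) : Int) := by
      rw [PySem.List.pyGetD_natCast, List.getD_eq_getElem?_getD]
      unfold countAt
      rw [List.getElem?_map, List.getElem?_eq_getElem hk0, hck0']
      have hsplit := count_take_add_drop cs c t
      have hle := cntLe_eq cs c
      have hwp : wpN cs t = cntLt cs c + (cs.take t).count c := by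
        unfold wpN wpPair
        rw [List.getD_eq_getElem cs default htn]
      simp only [Option.map_some, Option.getD_some]
      rw [hwp]
      push_cast
      omega
    have hwl : wlist cs t = (wpN cs t, (t : Int)) :: wlist cs (t + 1) := by
      unfold wlist
      rw [show cs.length - t = (cs.length - (t + 1)) + 1 by omega, List.range'_succ,
        List.map_cons]
    -- put the step together
    show stepA (csetOf cs) (countAt cs (t + 1), scat (wlist cs (t + 1)) ord) ((t : Int), c)
        = (countAt cs t, scat (wlist cs t) ord)
    simp only [stepA, hidx, Option.getD_some, gC]
    rw [hcnt, gW, PySem.List.pySetD_natCast, hwl]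
    rfl

theorem A_eq_scat (text : String) :
    sort_characters text = scat (wlist text.toList 0) (List.replicate text.toList.length 0) := by
  unfold sort_characters
  show (((PySem.List.enumerate text.toList 0).reverse).foldl
      (fun st p => stepA (csetOf text.toList) st p)
      ((PySem.List.pyRange 1
          ((((csetOf text.toList).map
              (fun c => (PySem.List.count text.toList c : Int))).length : Nat) : Int) 1).foldl
        (fun cnt i => PySem.List.pySetD cnt i
          (PySem.List.pyGetD cnt i 0 + PySem.List.pyGetD cnt (i - 1) 0))
        ((csetOf text.toList).map (fun c => (PySem.List.count text.toList c : Int))),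
       List.replicate text.toList.length (0 : Int))).2
    = scat (wlist text.toList 0) (List.replicate text.toList.length 0)
  rw [prefix_loop, List.length_map, count1_eq, List.foldl_reverse]
  have h0 := loop_inv text.toList text.toList.length 0 (by omega)
    (List.replicate text.toList.length 0)
  rw [List.drop_zero, Nat.cast_zero] at h0
  rw [h0]

theorem A_pointwise (cs : List Char) (k : Nat) (hk : k < cs.length) :
    (scat (wlist cs 0) (List.replicate cs.length (0 : Int)))[wpN cs k]? = some (k : Int) := by
  have hval : ∀ w ∈ wlist cs 0, w.1 < (List.replicate cs.length (0 : Int)).length := by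
    intro w hw
    rw [List.length_replicate]
    unfold wlist at hw
    rw [List.mem_map] at hw
    obtain ⟨k', hk', rfl⟩ := hw
    exact wpN_lt cs k' (by have := List.mem_range'_1.mp hk'; omega)
  rw [scat_getElem? _ _ _ hval]
  have hfind : (wlist cs 0).find? (fun w => w.1 == wpN cs k) = some (wpN cs k, (k : Int)) := by
    apply find?_eq_some_of_unique
    · unfold wlist
      rw [List.mem_map]
      exact ⟨k, List.mem_range'_1.mpr (by omega), rfl⟩
    · simp
    · intro y hy hpy
      unfold wlist at hy
      rw [List.mem_map] at hy
      obtain ⟨k', hk', rfl⟩ := hy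
      simp only [beq_iff_eq] at hpy
      have hk'lt : k' < cs.length := by have := List.mem_range'_1.mp hk'; omega
      have hkk : k' = k := by
        by_contra hne
        exact wpN_inj cs k' k hk'lt hk hne hpy
      subst hkk
      rfl
  rw [hfind]
  simp [wpN_lt cs k hk]

-- ===== VERDICT (by name: the statement is the Claim_ definition above) =====
theorem sort_characters_spec : Claim_equal_sort_characters := by
  intro text _
  unfold Spec_sort_characters
  rw [A_eq_scat, alt_eq_flatMap]
  apply List.ext_getElem?
  intro j
  by_cases hj : j < text.toList.length
  · obtain ⟨k, hk, hw⟩ := wpN_surj text.toList j hj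
    rw [← hw, A_pointwise _ _ hk, B_pointwise _ _ hk]
  · rw [List.getElem?_eq_none, List.getElem?_eq_none]
    · rw [length_B]; omega
    · rw [length_scat, List.length_replicate]; omega
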